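-- pv_equiv track=rewrite | github.com/Zitu8/Automated-Presentation-Generation | Packing/packing.py | pack_images
-- ===== SOURCE A (Python) =====
-- PADDING_CM = 0.1  # 0.2 cm padding between images
--
-- def pack_images(rectangles, max_width, max_height, start_x=0, start_y=0):
--     """Pack the images within the specified boundary."""
--     packed = []
--     x = start_x + max_width
--     y = start_y
--     max_row_height = 0
--
--     padding = int(PADDING_CM * 100)
--
--     for path, w, h in sorted(rectangles, key=lambda item: (item[1], item[2]), reverse=True):
--         if x - w - padding * 2 < start_x:
--             x = start_x + max_width
--             y += max_row_height + padding * 2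
--             max_row_height = 0
--
--         if y + h + padding * 2 > start_y + max_height:
--             return None
--
--         packed.append((path, x - w - padding, y + padding, w, h))
--         x -= w + padding * 2
--         max_row_height = max(max_row_height, h + padding * 2)
--
--     # Ensure equal vertical space from top and bottom
--     total_img_height = y + max_row_height - start_y
--     extra_space = max_height - total_img_height
--     vertical_shift = extra_space // 2
--
--     return [(path, x, y + vertical_shift, w, h) for path, x, y, w, h in packed]
-- ===== SOURCE B (Python) =====
-- PADDING_CM = 0.1  # 0.2 cm padding between images
--
--
-- def pack_images(rectangles, max_width, max_height, start_x=0, start_y=0):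
--     """Pack the images within the specified boundary (group-then-place)."""
--     padding = int(PADDING_CM * 100)
--
--     # Pass 1: split the sorted rectangles into rows, computing each x from the
--     # running right-to-left position; a row records its items and its height.
--     rows = []
--     cur, cur_h = [], 0
--     x = start_x + max_width
--     for path, w, h in sorted(rectangles, key=lambda item: (item[1], item[2]), reverse=True):
--         if x - w - padding * 2 < start_x:
--             rows.append((cur, cur_h))
--             cur, cur_h = [], 0
--             x = start_x + max_width
--         cur.append((path, x - w - padding, w, h))
--         x -= w + padding * 2
--         cur_h = max(cur_h, h + padding * 2)
--     rows.append((cur, cur_h))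
--
--     # Pass 2: assign each row a y, enforcing the height bound per item in order.
--     placed = []
--     y = start_y
--     for i, (items, row_h) in enumerate(rows):
--         for path, xp, w, h in items:
--             if y + h + padding * 2 > start_y + max_height:
--                 return None
--             placed.append((path, xp, y + padding, w, h))
--         if i + 1 < len(rows):
--             y += row_h + padding * 2
--
--     # Centre vertically: last row keeps y from the loop above.
--     total_img_height = y + rows[-1][1] - start_y
--     vertical_shift = (max_height - total_img_height) // 2
--     return [(path, xp, yp + vertical_shift, w, h) for path, xp, yp, w, h in placed]
-- ===== Notes on version B (the rewrite author's own statement) =====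
-- stated objective: alternative
-- what changed: Replaces A's single fused loop (mutable x/y/max_row_height advanced mid-scan) by two passes: first group the sorted rectangles into rows with x positions and row heights, then place the rows top-down assigning y per row and applying the centring shift.
import Mathlib
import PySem

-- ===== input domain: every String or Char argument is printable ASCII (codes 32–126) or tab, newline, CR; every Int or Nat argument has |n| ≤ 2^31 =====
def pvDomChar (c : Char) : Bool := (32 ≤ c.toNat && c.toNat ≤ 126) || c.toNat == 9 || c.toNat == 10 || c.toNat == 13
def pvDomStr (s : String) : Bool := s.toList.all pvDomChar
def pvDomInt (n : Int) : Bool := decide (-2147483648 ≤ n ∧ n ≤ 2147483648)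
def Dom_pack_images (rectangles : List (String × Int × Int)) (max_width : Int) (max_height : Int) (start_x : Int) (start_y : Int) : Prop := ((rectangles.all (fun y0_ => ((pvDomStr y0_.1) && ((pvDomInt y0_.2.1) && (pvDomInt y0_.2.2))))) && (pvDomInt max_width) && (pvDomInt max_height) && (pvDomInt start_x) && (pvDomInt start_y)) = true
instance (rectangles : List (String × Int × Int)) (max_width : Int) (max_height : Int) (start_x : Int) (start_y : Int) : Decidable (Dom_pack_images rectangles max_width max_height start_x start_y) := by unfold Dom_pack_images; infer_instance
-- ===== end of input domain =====

-- B replaces A's fused packing loop by two passes: group the sorted rectangles into rows (with x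
-- positions and row heights), then place the rows top-down and apply the centring shift. Same
-- return value everywhere; no speed claim.

-- ===== PORT A =====
-- Fused loop of Source A: state (packed, x, y, max_row_height); returns (packed, y, max_row_height),
-- none on the height check (Python's early `return None`).
def pvLoopA (start_x start_y max_width max_height padding : Int) :
    List (String × Int × Int) → List (String × Int × Int × Int × Int) → Int → Int → Int →
    Option (List (String × Int × Int × Int × Int) × Int × Int)
  | [], packed, _x, y, mrh => some (packed, y, mrh)
  | (path, w, h) :: rest, packed, x, y, mrh =>
    -- `if x - w - padding * 2 < start_x:` resets x, advances y, clears max_row_height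
    let s := if x - w - padding * 2 < start_x
      then (start_x + max_width, y + mrh + padding * 2, (0 : Int))
      else (x, y, mrh)
    if s.2.1 + h + padding * 2 > start_y + max_height then none
    else pvLoopA start_x start_y max_width max_height padding rest
      (packed ++ [(path, s.1 - w - padding, s.2.1 + padding, w, h)])
      (s.1 - (w + padding * 2)) s.2.1 (max s.2.2 (h + padding * 2))

def pack_images (rectangles : List (String × Int × Int)) (max_width : Int) (max_height : Int) (start_x : Int) (start_y : Int) : Option (List (String × Int × Int × Int × Int)) :=
  -- padding = int(PADDING_CM * 100): the float 0.1 * 100 = 10.000000000000002 truncates to 10 — exact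
  let padding : Int := 10
  match pvLoopA start_x start_y max_width max_height padding
      (PySem.List.sorted2 rectangles (fun item => item.2.1) (fun item => item.2.2) (reverse := true))
      [] (start_x + max_width) start_y 0 with
  | none => none
  | some (packed, y, mrh) =>
    some (packed.map (fun it =>
      (it.1, it.2.1, it.2.2.1 + PySem.Int.floordiv (max_height - (y + mrh - start_y)) 2,
       it.2.2.2.1, it.2.2.2.2)))

-- ===== PORT B =====
-- Pass 1 of Source B: split the sorted rectangles into rows; each row is (items, row height) with
-- items (path, x, w, h); `s` = (rows emitted now, cur, cur_h, x) after the row-break branch.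
def pvRowsB (start_x max_width padding : Int) :
    List (String × Int × Int) → List (String × Int × Int × Int) → Int → Int →
    List (List (String × Int × Int × Int) × Int)
  | [], cur, curh, _x => [(cur, curh)]
  | (path, w, h) :: rest, cur, curh, x =>
    let s := if x - w - padding * 2 < start_x
      then ([(cur, curh)], ([] : List (String × Int × Int × Int)), (0 : Int), start_x + max_width)
      else ([], cur, curh, x)
    s.1 ++ pvRowsB start_x max_width padding rest
      (s.2.1 ++ [(path, s.2.2.2 - w - padding, w, h)]) (max s.2.2.1 (h + padding * 2))
      (s.2.2.2 - (w + padding * 2))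

-- inner loop of pass 2 of Source B: place one row's items at height y
def pvPlaceRow (start_y max_height padding y : Int) :
    List (String × Int × Int × Int) → Option (List (String × Int × Int × Int × Int))
  | [] => some []
  | (path, xp, w, h) :: rest =>
    if y + h + padding * 2 > start_y + max_height then none
    else (pvPlaceRow start_y max_height padding y rest).map (fun t => (path, xp, y + padding, w, h) :: t)

-- pass 2 of Source B: assign each row a y (advance after every row but the last); returns
-- (placed, y of last row, height of last row)
def pvLayoutB (start_y max_height padding : Int) :
    List (List (String × Int × Int × Int) × Int) → Int →
    Option (List (String × Int × Int × Int × Int) × Int × Int)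
  | [], y => some ([], y, 0)
  | [(items, rh)], y => (pvPlaceRow start_y max_height padding y items).map (fun pl => (pl, y, rh))
  | (items, rh) :: r :: rs, y =>
    match pvPlaceRow start_y max_height padding y items with
    | none => none
    | some pl =>
      (pvLayoutB start_y max_height padding (r :: rs) (y + rh + padding * 2)).map
        (fun t => (pl ++ t.1, t.2.1, t.2.2))

def pack_images_alt (rectangles : List (String × Int × Int)) (max_width : Int) (max_height : Int) (start_x : Int) (start_y : Int) : Option (List (String × Int × Int × Int × Int)) :=
  let padding : Int := 10
  let rows := pvRowsB start_x max_width padding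
    (PySem.List.sorted2 rectangles (fun item => item.2.1) (fun item => item.2.2) (reverse := true))
    [] 0 (start_x + max_width)
  match pvLayoutB start_y max_height padding rows start_y with
  | none => none
  | some (placed, y, rh) =>
    some (placed.map (fun it =>
      (it.1, it.2.1, it.2.2.1 + PySem.Int.floordiv (max_height - (y + rh - start_y)) 2,
       it.2.2.2.1, it.2.2.2.2)))

-- ===== PRECONDITION & SPEC =====
def Spec_pack_images (rectangles : List (String × Int × Int)) (max_width : Int) (max_height : Int) (start_x : Int) (start_y : Int) (out : Option (List (String × Int × Int × Int × Int))) : Prop := out = pack_images_alt rectangles max_width max_height start_x start_y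
instance (rectangles : List (String × Int × Int)) (max_width : Int) (max_height : Int) (start_x : Int) (start_y : Int) (out : Option (List (String × Int × Int × Int × Int))) : Decidable (Spec_pack_images rectangles max_width max_height start_x start_y out) := by unfold Spec_pack_images; infer_instance

-- ===== CLAIM (what is proved, stated in full; the proofs are below) =====
def Claim_equal_pack_images : Prop := ∀ (rectangles : List (String × Int × Int)) (max_width : Int) (max_height : Int) (start_x : Int) (start_y : Int), Dom_pack_images rectangles max_width max_height start_x start_y → Spec_pack_images rectangles max_width max_height start_x start_y (pack_images rectangles max_width max_height start_x start_y)

-- ===== LEMMAS AND PROOFS =====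

-- an item placed at row height y
def pvPlaceItem (padding y : Int) (it : String × Int × Int × Int) : String × Int × Int × Int × Int :=
  (it.1, it.2.1, y + padding, it.2.2.1, it.2.2.2)

theorem pvPlaceRow_ok (start_y max_height padding y : Int) (items : List (String × Int × Int × Int))
    (h : ∀ it ∈ items, y + it.2.2.2 + padding * 2 ≤ start_y + max_height) :
    pvPlaceRow start_y max_height padding y items = some (items.map (pvPlaceItem padding y)) := by
  induction items with
  | nil => simp [pvPlaceRow]
  | cons a rest ih =>
    obtain ⟨p, xp, w, hh⟩ := a
    have h1 := h _ (List.mem_cons_self)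
    simp only [pvPlaceRow]
    rw [if_neg (by simpa using not_lt.mpr h1)]
    rw [ih (fun it hit => h it (List.mem_cons_of_mem _ hit))]
    simp [pvPlaceItem]

theorem pvPlaceRow_fail (start_y max_height padding y : Int)
    (cur : List (String × Int × Int × Int)) (itm : String × Int × Int × Int)
    (ext : List (String × Int × Int × Int))
    (hok : ∀ it ∈ cur, y + it.2.2.2 + padding * 2 ≤ start_y + max_height)
    (hbad : start_y + max_height < y + itm.2.2.2 + padding * 2) :
    pvPlaceRow start_y max_height padding y (cur ++ itm :: ext) = none := by
  induction cur with
  | nil =>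
    obtain ⟨p, xp, w, hh⟩ := itm
    simp only [List.nil_append, pvPlaceRow]
    rw [if_pos (by simpa using hbad)]
  | cons a rest ih =>
    obtain ⟨p, xp, w, hh⟩ := a
    have h1 := hok _ (List.mem_cons_self)
    simp only [List.cons_append, pvPlaceRow]
    rw [if_neg (by simpa using not_lt.mpr h1)]
    rw [ih (fun it hit => hok it (List.mem_cons_of_mem _ hit))]
    rfl

-- pvRowsB is nonempty and its first row's items extend cur
theorem pvRowsB_shape (start_x max_width padding : Int) (l : List (String × Int × Int)) :
    ∀ (cur : List (String × Int × Int × Int)) (curh x : Int),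
    ∃ ext rh rs, pvRowsB start_x max_width padding l cur curh x = (cur ++ ext, rh) :: rs := by
  induction l with
  | nil => intro cur curh x; exact ⟨[], curh, [], by simp [pvRowsB]⟩
  | cons a rest ih =>
    intro cur curh x
    obtain ⟨p, w, h⟩ := a
    by_cases hc : x - w - padding * 2 < start_x
    · refine ⟨[], curh,
        pvRowsB start_x max_width padding rest [(p, start_x + max_width - w - padding, w, h)]
          (max 0 (h + padding * 2)) (start_x + max_width - (w + padding * 2)), ?_⟩
      simp [pvRowsB, hc]
    · obtain ⟨ext, rh, rs, heq⟩ := ih (cur ++ [(p, x - w - padding, w, h)])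
        (max curh (h + padding * 2)) (x - (w + padding * 2))
      refine ⟨(p, x - w - padding, w, h) :: ext, rh, rs, ?_⟩
      simp only [pvRowsB, if_neg hc]
      simpa using heq

theorem pvLayoutB_head_none (start_y max_height padding : Int)
    (items : List (String × Int × Int × Int)) (rh : Int)
    (rs : List (List (String × Int × Int × Int) × Int)) (y : Int)
    (h : pvPlaceRow start_y max_height padding y items = none) :
    pvLayoutB start_y max_height padding ((items, rh) :: rs) y = none := by
  cases rs with
  | nil => simp [pvLayoutB, h]
  | cons r rs' => simp [pvLayoutB, h]

-- accumulator lemma for A's loop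
theorem pvLoopA_acc (start_x start_y max_width max_height padding : Int)
    (l : List (String × Int × Int)) :
    ∀ (packed : List (String × Int × Int × Int × Int)) (x y mrh : Int),
    pvLoopA start_x start_y max_width max_height padding l packed x y mrh
      = (pvLoopA start_x start_y max_width max_height padding l [] x y mrh).map
          (fun t => (packed ++ t.1, t.2.1, t.2.2)) := by
  induction l with
  | nil => intro packed x y mrh; simp [pvLoopA]
  | cons a rest ih =>
    intro packed x y mrh
    obtain ⟨p, w, h⟩ := a
    simp only [pvLoopA]
    split
    all_goals
      rw [ih (packed ++ _), ih ([] ++ _)]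
      cases pvLoopA start_x start_y max_width max_height padding rest [] _ _ _ <;>
        (split <;> simp)

-- MAIN LEMMA: B's layout of the rows emitted from state (cur, curh, x) equals A's loop from
-- state (x, y, curh) with cur's items (all already checked at height y) prepended.
theorem pvMain (start_x start_y max_width max_height padding : Int)
    (l : List (String × Int × Int)) :
    ∀ (cur : List (String × Int × Int × Int)) (curh x y : Int),
    (∀ it ∈ cur, y + it.2.2.2 + padding * 2 ≤ start_y + max_height) →
    pvLayoutB start_y max_height padding (pvRowsB start_x max_width padding l cur curh x) y
      = (pvLoopA start_x start_y max_width max_height padding l [] x y curh).map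
          (fun t => (cur.map (pvPlaceItem padding y) ++ t.1, t.2.1, t.2.2)) := by
  induction l with
  | nil =>
    intro cur curh x y hok
    simp [pvRowsB, pvLayoutB, pvLoopA, pvPlaceRow_ok start_y max_height padding y cur hok]
  | cons a rest ih =>
    intro cur curh x y hok
    obtain ⟨p, w, h⟩ := a
    have hplace := pvPlaceRow_ok start_y max_height padding y cur hok
    by_cases hc : x - w - padding * 2 < start_x
    · -- row break: cur is closed, the item starts a fresh row at y' = y + curh + 2*padding
      have hrows : pvRowsB start_x max_width padding ((p, w, h) :: rest) cur curh x
          = (cur, curh) :: pvRowsB start_x max_width padding rest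
              [(p, start_x + max_width - w - padding, w, h)] (max 0 (h + padding * 2))
              (start_x + max_width - (w + padding * 2)) := by
        simp [pvRowsB, hc]
      obtain ⟨ext, rh, rs, hshape⟩ := pvRowsB_shape start_x max_width padding rest
        [(p, start_x + max_width - w - padding, w, h)] (max 0 (h + padding * 2))
        (start_x + max_width - (w + padding * 2))
      simp only [List.singleton_append] at hshape
      rw [hrows, hshape]
      simp only [pvLayoutB, hplace, pvLoopA, if_pos hc]
      by_cases hb : start_y + max_height < y + curh + padding * 2 + h + padding * 2
      · -- height check fails on the new row's first item
        have hfail : pvPlaceRow start_y max_height padding (y + curh + padding * 2)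
            ([] ++ (p, start_x + max_width - w - padding, w, h) :: ext) = none :=
          pvPlaceRow_fail _ _ _ _ [] (p, start_x + max_width - w - padding, w, h) ext
            (by simp) (by simpa using hb)
        simp only [List.nil_append] at hfail
        rw [pvLayoutB_head_none start_y max_height padding _ rh rs _ hfail]
        rw [if_pos (by simpa using hb)]
      · -- check passes: recurse with cur = [item] at y'
        have ihres := ih [(p, start_x + max_width - w - padding, w, h)] (max 0 (h + padding * 2))
          (start_x + max_width - (w + padding * 2)) (y + curh + padding * 2)
          (by intro it hit; simp at hit; subst hit; simpa using not_lt.mp hb)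
        rw [hshape] at ihres
        rw [ihres, if_neg (by simpa using hb)]
        rw [pvLoopA_acc start_x start_y max_width max_height padding rest
          ([] ++ [(p, start_x + max_width - w - padding,
            y + curh + padding * 2 + padding, w, h)])]
        cases pvLoopA start_x start_y max_width max_height padding rest []
          (start_x + max_width - (w + padding * 2)) (y + curh + padding * 2)
          (max 0 (h + padding * 2)) <;> simp [pvPlaceItem]
    · -- same row: item appended to cur
      have hrows : pvRowsB start_x max_width padding ((p, w, h) :: rest) cur curh x
          = pvRowsB start_x max_width padding rest (cur ++ [(p, x - w - padding, w, h)])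
              (max curh (h + padding * 2)) (x - (w + padding * 2)) := by
        simp [pvRowsB, hc]
      rw [hrows]
      simp only [pvLoopA, if_neg hc]
      by_cases hb : start_y + max_height < y + h + padding * 2
      · -- check fails on this item
        obtain ⟨ext, rh, rs, hshape⟩ := pvRowsB_shape start_x max_width padding rest
          (cur ++ [(p, x - w - padding, w, h)]) (max curh (h + padding * 2)) (x - (w + padding * 2))
        rw [hshape]
        have hfail : pvPlaceRow start_y max_height padding y
            ((cur ++ [(p, x - w - padding, w, h)]) ++ ext) = none := by
          rw [List.append_assoc]
          exact pvPlaceRow_fail _ _ _ _ cur (p, x - w - padding, w, h) ext hok (by simpa using hb)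
        rw [pvLayoutB_head_none start_y max_height padding _ rh rs y hfail]
        rw [if_pos (by simpa using hb)]
        simp
      · have ihres := ih (cur ++ [(p, x - w - padding, w, h)]) (max curh (h + padding * 2))
          (x - (w + padding * 2)) y
          (by
            intro it hit
            rcases List.mem_append.mp hit with h1 | h1
            · exact hok it h1
            · simp at h1; subst h1; simpa using not_lt.mp hb)
        rw [ihres, if_neg (by simpa using hb)]
        rw [pvLoopA_acc start_x start_y max_width max_height padding rest
          ([] ++ [(p, x - w - padding, y + padding, w, h)])]
        cases pvLoopA start_x start_y max_width max_height padding rest []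
          (x - (w + padding * 2)) y (max curh (h + padding * 2)) <;> simp [pvPlaceItem]

-- ===== VERDICT (by name: the statement is the Claim_ definition above) =====
theorem pack_images_spec : Claim_equal_pack_images := by
  intro rectangles max_width max_height start_x start_y _hdom
  show pack_images rectangles max_width max_height start_x start_y
      = pack_images_alt rectangles max_width max_height start_x start_y
  simp only [pack_images, pack_images_alt]
  rw [pvMain start_x start_y max_width max_height 10
    (PySem.List.sorted2 rectangles (fun item => item.2.1) (fun item => item.2.2) (reverse := true))
    [] 0 (start_x + max_width) start_y (by simp)]
  cases pvLoopA start_x start_y max_width max_height 10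
    (PySem.List.sorted2 rectangles (fun item => item.2.1) (fun item => item.2.2) (reverse := true))
    [] (start_x + max_width) start_y 0 <;> simp
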